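-- pv_equiv track=rewrite | github.com/taeukkk/baekjoon | week03/n_game.py | solution
-- ===== SOURCE A (Python) =====
-- def change_num(num,n):
--     table = {k:v for (k,v) in zip([i for i in range(10,16)],['A','B','C','D','E','F'])}
--     result = []
--     while num!=0:
--         temp = int(num%n)
--         if temp in table:
--             result.append(table[temp])
--         else:
--             result.append(temp)
--         num = int(num//n)
--     result.reverse()
--     return ''.join(str(r) for r in result)
--
-- def solution(n, t, m, p):
--     answer = ''
--     word = "0"
--     start = 1
--     while len(word)<=t*m:
--         word += change_num(start,n)
--         start+=1
--
--     for i in range(p-1,t*m,m):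
--         answer += word[i]
--     return answer
-- ===== SOURCE B (Python) =====
-- def solution(n, t, m, p):
--     # Stream the base-n digit sequence number by number with a running global
--     # position counter, collecting the characters at positions p-1, p-1+m,
--     # p-1+2m, ... below t*m, without ever materializing the word.
--     def digits(k):
--         if k == 0:
--             return "0"
--         s = ""
--         while k != 0:
--             d = k % n
--             s = ("0123456789ABCDEF"[d] if 0 <= d < 16 else str(d)) + s
--             k //= n
--         return s
--
--     out = []
--     pos = 0
--     k = 0
--     end = t * m
--     while pos < end:
--         for c in digits(k):
--             if pos >= end:
--                 break
--             if pos >= p - 1 and (pos - (p - 1)) % m == 0: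
--                 out.append(c)
--             pos += 1
--         k += 1
--     return ''.join(out)
-- ===== Notes on version B (the rewrite author's own statement) =====
-- stated objective: alternative
-- what changed: B streams the base-n digit sequence one integer at a time with a running global position counter, collecting the characters at positions p-1, p-1+m, p-1+2m, ... below t*m as they are produced, instead of materializing the whole word until its length exceeds t*m and then sampling it with a stepped range; the big word string is never built.
-- outside the precondition, e.g. on solution(2, 2, 2, 0): A returns '110', B returns '10'; on solution(2, 1, -1, 1): A returns '0', B returns ''
import Mathlib
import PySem

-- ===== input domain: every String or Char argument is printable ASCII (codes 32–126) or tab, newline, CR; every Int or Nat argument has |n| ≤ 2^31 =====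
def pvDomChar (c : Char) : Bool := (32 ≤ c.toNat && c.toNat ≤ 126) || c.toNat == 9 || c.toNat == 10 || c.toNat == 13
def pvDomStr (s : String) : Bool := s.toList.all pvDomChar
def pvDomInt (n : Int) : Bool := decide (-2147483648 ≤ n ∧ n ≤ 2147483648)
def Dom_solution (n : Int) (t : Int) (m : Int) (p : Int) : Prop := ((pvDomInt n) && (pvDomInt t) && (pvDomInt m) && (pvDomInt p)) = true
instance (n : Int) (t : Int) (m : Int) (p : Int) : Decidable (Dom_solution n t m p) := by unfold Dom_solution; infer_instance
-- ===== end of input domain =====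

-- B streams the base-n digit sequence with a running position counter and stops after t picks,
-- instead of materializing the whole word and then sampling it with a stepped range (objective: alternative).

-- ===== PORT A =====
-- the dict {10:'A', …, 15:'F'} built by the comprehension in change_num
def pvTable : PySem.Dict Int Char :=
  ⟨[(10,'A'),(11,'B'),(12,'C'),(13,'D'),(14,'E'),(15,'F')]⟩

-- one appended element of `result`, already rendered by the str() the join applies
def pvDigA (temp : Int) : List Char :=
  match PySem.Dict.get? pvTable temp with
  | some c => [c]                       -- str('A') = 'A'
  | none => PySem.Int.toChars temp      -- str(temp)

-- while num != 0: …  — fuel num.natAbs+1 bounds the iterations (num//n shrinks towards 0 for n ≥ 2)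
def changeNumLoop (n : Int) : Nat → Int → List (List Char) → List (List Char)
  | 0, _, result => result
  | fuel+1, num, result =>
    if num = 0 then result
    else changeNumLoop n fuel (PySem.Int.floordiv num n)
          (result ++ [pvDigA (PySem.Int.mod num n)])

def changeNum (num n : Int) : List Char :=
  ((changeNumLoop n (num.natAbs + 1) num []).reverse).flatten

-- while len(word) <= t*m: …  — fuel (t*m).toNat+1 bounds the iterations (word grows by ≥ 1 per step)
def wordLoop (n t m : Int) : Nat → Int → List Char → List Char
  | 0, _, word => word
  | fuel+1, start, word =>
    if (word.length : Int) ≤ t * m then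
      wordLoop n t m fuel (start + 1) (word ++ changeNum start n)
    else word

def solution (n : Int) (t : Int) (m : Int) (p : Int) : String :=
  let word := wordLoop n t m ((t*m).toNat + 1) 1 ['0']
  String.ofList ((PySem.List.pyRange (p-1) (t*m) m).foldl
    (fun acc i => acc ++ ((PySem.List.pyGet? word i).elim [] (fun c => [c]))) [])

-- ===== PORT B =====
def pvHex : List Char := "0123456789ABCDEF".toList

-- "0123456789ABCDEF"[d] if 0 <= d < 16 else str(d)
def pvDigB (d : Int) : List Char :=
  if 0 ≤ d ∧ d < 16 then (PySem.List.pyGet? pvHex d).elim [] (fun c => [c])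
  else PySem.Int.toChars d

-- while k != 0: s = dig + s; k //= n  — same fuel bound as A's digit loop
def altDigitsLoop (n : Int) : Nat → Int → List Char → List Char
  | 0, _, s => s
  | fuel+1, k, s =>
    if k = 0 then s
    else altDigitsLoop n fuel (PySem.Int.floordiv k n) (pvDigB (PySem.Int.mod k n) ++ s)

def altDigits (k n : Int) : List Char :=
  if k = 0 then ['0'] else altDigitsLoop n (k.natAbs + 1) k []

-- the inner `for c in digits(k)` with its break at position t*m
def altScan (t m p : Int) : List Char → List Char → Int → List Char × Int
  | [], out, pos => (out, pos)
  | c :: cs, out, pos =>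
    if pos ≥ t*m then (out, pos)
    else if pos ≥ p - 1 ∧ PySem.Int.mod (pos - (p - 1)) m = 0 then
      altScan t m p cs (out ++ [c]) (pos + 1)
    else altScan t m p cs out (pos + 1)

-- while pos < end — fuel (t*m).toNat+2 bounds the integers consumed (each emits ≥ 1 char)
def altLoop (n t m p : Int) : Nat → Int → Int → List Char → List Char
  | 0, _, _, out => out
  | fuel+1, k, pos, out =>
    if pos < t*m then
      let r := altScan t m p (altDigits k n) out pos
      altLoop n t m p fuel (k + 1) r.2 r.1
    else out

def solution_alt (n : Int) (t : Int) (m : Int) (p : Int) : String :=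
  String.ofList (altLoop n t m p ((t*m).toNat + 2) 0 0 [])

-- ===== PRECONDITION & SPEC =====
-- Pre_ is the function's real domain: |n| ≥ 2 (n = 0 makes A divide by zero, n = 1 loops forever),
-- step m ≥ 1 (m = 0 raises ValueError in range; for m < 0 A usually raises IndexError and, where it
-- does return, it samples a descending range that ends in Python's negative-index wraparound), and
-- start p ≥ 1 (for p ≤ 0 A samples through negative-index wraparound, an accident of the
-- implementation).
def Pre_solution (n : Int) (t : Int) (m : Int) (p : Int) : Prop :=
  (n ≤ -2 ∨ 2 ≤ n) ∧ 1 ≤ m ∧ 1 ≤ p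
instance (n : Int) (t : Int) (m : Int) (p : Int) : Decidable (Pre_solution n t m p) := by
  unfold Pre_solution; infer_instance

def pvWitness_solution : Int × Int × Int × Int := (2, 3, 2, 1)

def Spec_solution (n : Int) (t : Int) (m : Int) (p : Int) (out : String) : Prop := out = solution_alt n t m p
instance (n : Int) (t : Int) (m : Int) (p : Int) (out : String) : Decidable (Spec_solution n t m p out) := by
  unfold Spec_solution; infer_instance

-- ===== CLAIM (what is proved, stated in full; the proofs are below) =====
def Claim_equal_solution : Prop := ∀ (n : Int) (t : Int) (m : Int) (p : Int), Dom_solution n t m p → Pre_solution n t m p → Spec_solution n t m p (solution n t m p)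

-- ===== LEMMAS AND PROOFS =====

-- reference digit recursions (most-significant digit first), one for each port's digit loop
def digRefA (n : Int) : Nat → Int → List Char
  | 0, _ => []
  | f+1, num => if num = 0 then [] else
      digRefA n f (PySem.Int.floordiv num n) ++ pvDigA (PySem.Int.mod num n)

def digRefB (n : Int) : Nat → Int → List Char
  | 0, _ => []
  | f+1, num => if num = 0 then [] else
      digRefB n f (PySem.Int.floordiv num n) ++ pvDigB (PySem.Int.mod num n)

-- the k-th chunk of the infinite digit stream, its finite prefixes, and its characters
def chunkN (n : Int) (k : Nat) : List Char := altDigits (k : Int) n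
def streamPre (n : Int) (K : Nat) : List Char := (List.range K).flatMap (chunkN n)
def sChar (n : Int) (i : Nat) : Char := (streamPre n (i+1)).getD i '?'
-- the first c collected characters: stream positions p-1, p-1+m, p-1+2m, …
def coll (n : Int) (P M : Nat) (c : Nat) : List Char :=
  (List.range c).map (fun j => sChar n (P + j*M))

lemma cnLoop_flatten (n : Int) : ∀ (f : Nat) (num : Int) (acc : List (List Char)),
    ((changeNumLoop n f num acc).reverse).flatten = digRefA n f num ++ (acc.reverse).flatten := by
  intro f
  induction f with
  | zero => intro num acc; simp [changeNumLoop, digRefA]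
  | succ f ih =>
    intro num acc
    by_cases h : num = 0
    · simp [changeNumLoop, digRefA, h]
    · simp only [changeNumLoop, digRefA, if_neg h]
      rw [ih]
      simp

lemma adLoop_eq (n : Int) : ∀ (f : Nat) (k : Int) (s : List Char),
    altDigitsLoop n f k s = digRefB n f k ++ s := by
  intro f
  induction f with
  | zero => intro k s; simp [altDigitsLoop, digRefB]
  | succ f ih =>
    intro k s
    by_cases h : k = 0
    · simp [altDigitsLoop, digRefB, h]
    · simp only [altDigitsLoop, digRefB, if_neg h]
      rw [ih]
      simp

lemma pvDig_eq (d : Int) : pvDigA d = pvDigB d := by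
  by_cases h : 0 ≤ d ∧ d < 16
  · obtain ⟨h0, h1⟩ := h
    interval_cases d <;> decide
  · have hA : PySem.Dict.get? pvTable d = none := by
      simp only [PySem.Dict.get?, pvTable]
      have hk : ∀ x ∈ [((10:Int),'A'),(11,'B'),(12,'C'),(13,'D'),(14,'E'),(15,'F')],
          ¬ (x.1 == d) = true := by
        intro x hx
        fin_cases hx <;> simp <;> omega
      rw [List.find?_eq_none.mpr hk]
      rfl
    simp [pvDigA, pvDigB, hA, h]

lemma digRef_eq (n : Int) : ∀ (f : Nat) (num : Int), digRefA n f num = digRefB n f num := by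
  intro f
  induction f with
  | zero => intro num; rfl
  | succ f ih =>
    intro num
    by_cases h : num = 0
    · simp [digRefA, digRefB, h]
    · simp only [digRefA, digRefB, if_neg h]
      rw [ih, pvDig_eq]

lemma changeNum_eq_chunk (n : Int) (k : Nat) (hk : 1 ≤ k) :
    changeNum (k : Int) n = chunkN n k := by
  have hk0 : (k : Int) ≠ 0 := by exact_mod_cast Nat.one_le_iff_ne_zero.mp hk
  unfold changeNum chunkN altDigits
  rw [if_neg hk0, adLoop_eq, cnLoop_flatten]
  simp [digRef_eq n]

lemma toDigitsCore_len_le (b : Nat) : ∀ (f n : Nat) (ds : List Char),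
    ds.length ≤ (Nat.toDigitsCore b f n ds).length := by
  intro f
  induction f with
  | zero => intro n ds; simp [Nat.toDigitsCore]
  | succ f ih =>
    intro n ds
    simp only [Nat.toDigitsCore]
    split
    · simp
    · exact le_trans (by simp) (ih _ _)

lemma toChars_ne_nil (d : Int) : PySem.Int.toChars d ≠ [] := by
  unfold PySem.Int.toChars
  split
  · simp
  · unfold Nat.toDigits
    simp only [Nat.toDigitsCore]
    split
    · simp
    · intro hnil
      have := toDigitsCore_len_le 10 (Int.toNat d) (Int.toNat d / 10)
        (Nat.digitChar (Int.toNat d % 10) :: [])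
      rw [hnil] at this
      simp at this

lemma pvDigB_ne_nil (d : Int) : pvDigB d ≠ [] := by
  unfold pvDigB
  by_cases h : 0 ≤ d ∧ d < 16
  · rw [if_pos h, PySem.List.pyGet?_of_nonneg _ h.1]
    have hlt : d.toNat < pvHex.length := by simp [pvHex]; omega
    simp [List.getElem?_eq_getElem hlt]
  · rw [if_neg h]
    exact toChars_ne_nil d

lemma chunk_ne_nil (n : Int) (k : Nat) : chunkN n k ≠ [] := by
  unfold chunkN altDigits
  by_cases hk : (k : Int) = 0
  · simp [hk]
  · rw [if_neg hk, adLoop_eq]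
    show digRefB n ((k:Int).natAbs + 1) k ++ [] ≠ []
    simp only [digRefB, if_neg hk, List.append_nil]
    exact List.append_ne_nil_of_right_ne_nil _
      (pvDigB_ne_nil _)

lemma streamPre_succ (n : Int) (K : Nat) :
    streamPre n (K+1) = streamPre n K ++ chunkN n K := by
  simp [streamPre, List.range_succ]

lemma le_length_streamPre (n : Int) (K : Nat) : K ≤ (streamPre n K).length := by
  induction K with
  | zero => simp
  | succ K ih =>
    rw [streamPre_succ]
    have := List.length_pos_of_ne_nil (chunk_ne_nil n K)
    simp only [List.length_append]
    omega

lemma streamPre_prefix (n : Int) {K K' : Nat} (h : K ≤ K') :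
    streamPre n K <+: streamPre n K' := by
  induction K' with
  | zero => have : K = 0 := by omega
            subst this; exact List.prefix_refl _
  | succ K' ih =>
    rcases Nat.lt_or_ge K (K'+1) with h' | h'
    · exact (ih (by omega)).trans (by rw [streamPre_succ]; exact List.prefix_append _ _)
    · have : K = K' + 1 := by omega
      subst this; exact List.prefix_refl _

lemma getD_streamPre (n : Int) {K i : Nat} (h : i < (streamPre n K).length) (d : Char) :
    (streamPre n K).getD i d = sChar n i := by
  unfold sChar
  rcases le_total (i+1) K with hK | hK
  · obtain ⟨r, hr⟩ := streamPre_prefix n hK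
    have hi : i < (streamPre n (i+1)).length :=
      lt_of_lt_of_le (Nat.lt_succ_self i) (le_length_streamPre n (i+1))
    rw [← hr, List.getD_append _ _ _ _ hi, List.getD_eq_getElem _ _ hi, List.getD_eq_getElem _ _ hi]
  · obtain ⟨r, hr⟩ := streamPre_prefix n hK
    rw [← hr, List.getD_append _ _ _ _ h, List.getD_eq_getElem _ _ h, List.getD_eq_getElem _ _ h]

lemma wordLoop_spec (n t m : Int) : ∀ (f s : Nat), 1 ≤ s → t*m < (s:Int) + (f:Int) →
    ∃ K : Nat, wordLoop n t m f (s:Int) (streamPre n s) = streamPre n K ∧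
      t*m < ((streamPre n K).length : Int) := by
  intro f
  induction f with
  | zero =>
    intro s hs hbound
    refine ⟨s, by simp [wordLoop], ?_⟩
    have := le_length_streamPre n s
    push_cast at hbound ⊢
    omega
  | succ f ih =>
    intro s hs hbound
    by_cases hc : ((streamPre n s).length : Int) ≤ t*m
    · have h1 : streamPre n s ++ changeNum (s:Int) n = streamPre n (s+1) := by
        rw [changeNum_eq_chunk n s hs, ← streamPre_succ]
      have h2 : ((s:Int)+1) = ((s+1 : Nat):Int) := by push_cast; ring
      simp only [wordLoop, if_pos hc, h1, h2]
      exact ih (s+1) (by omega) (by push_cast at hbound ⊢; omega)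
    · exact ⟨s, by simp only [wordLoop, if_neg hc], by omega⟩

lemma coll_succ (n : Int) (P M c : Nat) :
    coll n P M (c+1) = coll n P M c ++ [sChar n (P + c*M)] := by
  simp [coll, List.range_succ]

-- there is exactly one c with "the first c targets lie below W and the next does not"
lemma hit_unique (P M W c1 c2 : Nat)
    (h1 : W ≤ P + c1*M) (h2 : c1 = 0 ∨ P + (c1-1)*M < W)
    (h3 : W ≤ P + c2*M) (h4 : c2 = 0 ∨ P + (c2-1)*M < W) : c1 = c2 := by
  rcases lt_trichotomy c1 c2 with h | h | h
  · exfalso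
    rcases h4 with h0 | hlt
    · omega
    · have : c1*M ≤ (c2-1)*M := Nat.mul_le_mul_right M (by omega)
      omega
  · exact h
  · exfalso
    rcases h2 with h0 | hlt
    · omega
    · have : c2*M ≤ (c1-1)*M := Nat.mul_le_mul_right M (by omega)
      omega

lemma altScan_spec (n t m p : Int) (P M W : Nat)
    (hP : (P:Int) = p - 1) (hM : (M:Int) = m) (hW : (W:Int) = t*m) (hM1 : 1 ≤ M) :
    ∀ (cs : List Char) (pos c : Nat) (out : List Char),
    (∀ i (h : i < cs.length), cs[i] = sChar n (pos + i)) →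
    out = coll n P M c →
    pos ≤ W →
    pos ≤ P + c*M → (c = 0 ∨ P + (c-1)*M < pos) →
    ∃ c', (altScan t m p cs out (pos:Int)).1 = coll n P M c' ∧
      (altScan t m p cs out (pos:Int)).2 = ((min (pos + cs.length) W : Nat):Int) ∧
      min (pos + cs.length) W ≤ P + c'*M ∧
      (c' = 0 ∨ P + (c'-1)*M < min (pos + cs.length) W) := by
  intro cs
  induction cs with
  | nil =>
    intro pos c out _ hout hposW hub hlb
    have hmin : min (pos + ([]:List Char).length) W = pos := by simp; omega
    exact ⟨c, by simp [altScan, hout], by rw [hmin]; simp [altScan],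
      by rw [hmin]; exact hub, by rw [hmin]; exact hlb⟩
  | cons a cs ih =>
    intro pos c out hcs hout hposW hub hlb
    have hppos : ((pos:Int) + 1) = ((pos+1 : Nat):Int) := by push_cast; ring
    have hlc : (a::cs).length = cs.length + 1 := by simp
    by_cases hend : (pos:Int) ≥ t*m
    · -- break: the window is exhausted, pos = W
      have hpW : pos = W := by omega
      have hmin : min (pos + (a::cs).length) W = pos := by omega
      refine ⟨c, ?_, ?_, by rw [hmin]; exact hub, by rw [hmin]; exact hlb⟩
      · simp only [altScan, if_pos hend, hout]
      · simp only [altScan, if_pos hend]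
        rw [hmin]
    · have hposW' : pos < W := by omega
      by_cases hcond : (pos:Int) ≥ p - 1 ∧ PySem.Int.mod ((pos:Int) - (p - 1)) m = 0
      · -- a hit: pos is exactly the next target position P + c*M
        have hgeP : P ≤ pos := by omega
        have hdvd : M ∣ (pos - P) := by
          have h1 := (PySem.Int.mod_eq_zero_iff_dvd _ _).mp hcond.2
          have h2 : (pos:Int) - (p-1) = ((pos - P : Nat):Int) := by omega
          rw [h2, ← hM] at h1
          exact_mod_cast h1
        obtain ⟨j, hj⟩ := hdvd
        have hposj : pos = P + j*M := by rw [Nat.mul_comm] at hj; omega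
        have hjc : j = c := by
          rcases hlb with h0 | hlt
          · subst h0
            have hub' : pos ≤ P := by simpa using hub
            rcases Nat.eq_zero_or_pos j with hz | hpos1
            · omega
            · exfalso
              have hM' : M ≤ j*M := by
                calc M = 1*M := (one_mul M).symm
                _ ≤ j*M := Nat.mul_le_mul_right M hpos1
              omega
          · have h2 : j ≤ c := Nat.le_of_mul_le_mul_right (by omega) (by omega : 0 < M)
            have h4 : c-1 < j := (Nat.mul_lt_mul_right (by omega : 0 < M)).mp (by omega)
            omega
        rw [hjc] at hposj
        have hhead : a = sChar n (P + c*M) := by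
          have h0 := hcs 0 (by simp)
          simpa [hposj] using h0
        have hout1 : out ++ [a] = coll n P M (c+1) := by
          rw [hout, hhead, coll_succ]
        have hgoal1 : altScan t m p (a :: cs) out (pos:Int)
            = altScan t m p cs (out ++ [a]) ((pos+1 : Nat):Int) := by
          simp only [altScan, if_neg hend, if_pos hcond, hppos]
        obtain ⟨c', h1, h2, h3, h4⟩ := ih (pos+1) (c+1) (out ++ [a])
          (fun i hi => by
            have h5 := hcs (i+1) (by simpa using Nat.succ_lt_succ hi)
            have h6 : pos + (i+1) = (pos+1) + i := by omega
            rw [h6] at h5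
            simpa using h5)
          hout1 (by omega)
          (by have he : (c+1)*M = c*M + M := by ring
              omega)
          (Or.inr (by simp only [Nat.add_sub_cancel]; omega))
        refine ⟨c', by rw [hgoal1, h1], ?_, by omega, ?_⟩
        · rw [hgoal1, h2]; congr 1; omega
        · rcases h4 with g | g
          · exact Or.inl g
          · exact Or.inr (by omega)
      · -- no hit at pos: invariants survive one step
        have hne : pos ≠ P + c*M := by
          intro hEq
          apply hcond
          refine ⟨by omega, ?_⟩
          rw [PySem.Int.mod_eq_zero_iff_dvd]
          refine ⟨(c:Int), ?_⟩
          rw [hEq]; push_cast; rw [hP, hM]; ring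
        have hgoal1 : altScan t m p (a :: cs) out (pos:Int)
            = altScan t m p cs out ((pos+1 : Nat):Int) := by
          simp only [altScan, if_neg hend, if_neg hcond, hppos]
        obtain ⟨c', h1, h2, h3, h4⟩ := ih (pos+1) c out
          (fun i hi => by
            have h5 := hcs (i+1) (by simpa using Nat.succ_lt_succ hi)
            have h6 : pos + (i+1) = (pos+1) + i := by omega
            rw [h6] at h5
            simpa using h5)
          hout (by omega) (by omega)
          (by rcases hlb with h | h
              · exact Or.inl h
              · exact Or.inr (by omega))
        refine ⟨c', by rw [hgoal1, h1], ?_, by omega, ?_⟩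
        · rw [hgoal1, h2]; congr 1; omega
        · rcases h4 with g | g
          · exact Or.inl g
          · exact Or.inr (by omega)

lemma altLoop_done (n t m p : Int) (f : Nat) (k pos : Int) (out : List Char)
    (h : ¬ (pos < t*m)) : altLoop n t m p f k pos out = out := by
  cases f with
  | zero => rfl
  | succ f => simp [altLoop, h]

lemma altLoop_spec (n t m p : Int) (P M W C : Nat)
    (hP : (P:Int) = p - 1) (hM : (M:Int) = m) (hW : (W:Int) = t*m) (hM1 : 1 ≤ M)
    (hC1 : W ≤ P + C*M) (hC2 : C = 0 ∨ P + (C-1)*M < W) :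
    ∀ (f k c : Nat) (out : List Char),
    out = coll n P M c →
    (streamPre n k).length ≤ W →
    (streamPre n k).length ≤ P + c*M →
    (c = 0 ∨ P + (c-1)*M < (streamPre n k).length) →
    W ≤ k + f →
    altLoop n t m p f (k:Int) (((streamPre n k).length : Nat):Int) out = coll n P M C := by
  intro f
  induction f with
  | zero =>
    intro k c out hout hWle hub hlb hbound
    have hk := le_length_streamPre n k
    have hlW : (streamPre n k).length = W := by omega
    rw [hlW] at hub hlb
    have hc : c = C := hit_unique P M W c C hub hlb hC1 hC2
    rw [hout, hc]; rfl
  | succ f ih =>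
    intro k c out hout hWle hub hlb hbound
    by_cases hcnd : (streamPre n k).length < W
    · have hcond : ((((streamPre n k).length : Nat):Int) < t*m) := by omega
      have hchars : ∀ i (h : i < (altDigits (k:Int) n).length),
          (altDigits (k:Int) n)[i] = sChar n ((streamPre n k).length + i) := by
        intro i hi
        have hi2 : i < (chunkN n k).length := hi
        have hlen : (streamPre n k).length + i < (streamPre n (k+1)).length := by
          rw [streamPre_succ]; simp only [List.length_append]; omega
        have hgd := getD_streamPre n hlen '?'
        rw [streamPre_succ, List.getD_append_right _ _ _ _ (by omega)] at hgd
        simp only [Nat.add_sub_cancel_left] at hgd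
        have hfin : (chunkN n k)[i] = sChar n ((streamPre n k).length + i) := by
          rw [← hgd, List.getD_eq_getElem _ _ hi2]
        exact hfin
      obtain ⟨c', h1, h2, h3, h4⟩ := altScan_spec n t m p P M W hP hM hW hM1
        (altDigits (k:Int) n) (streamPre n k).length c out hchars hout (by omega) hub hlb
      simp only [altLoop, if_pos hcond]
      rw [h1, h2]
      have hlen1 : (streamPre n k).length + (altDigits (k:Int) n).length
          = (streamPre n (k+1)).length := by
        rw [streamPre_succ, List.length_append]
        rfl
      by_cases hover : (streamPre n k).length + (altDigits (k:Int) n).length ≤ W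
      · have hmin : min ((streamPre n k).length + (altDigits (k:Int) n).length) W
            = (streamPre n k).length + (altDigits (k:Int) n).length := by omega
        rw [hmin] at h3 h4 ⊢
        have hk1 : ((k:Int) + 1) = ((k+1 : Nat):Int) := by push_cast; ring
        rw [hk1, show (((streamPre n k).length + (altDigits (k:Int) n).length : Nat):Int)
            = (((streamPre n (k+1)).length : Nat):Int) from by rw [hlen1]]
        exact ih (k+1) c' _ rfl (by omega) (by omega)
          (by rw [← hlen1]; exact h4) (by omega)
      · have hmin : min ((streamPre n k).length + (altDigits (k:Int) n).length) W = W := by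
          omega
        rw [hmin] at h3 h4 ⊢
        rw [altLoop_done _ _ _ _ _ _ _ _ (by omega)]
        have hc : c' = C := hit_unique P M W c' C h3 h4 hC1 hC2
        rw [hc]
    · rw [altLoop_done _ _ _ _ _ _ _ _ (by omega)]
      have hlW : (streamPre n k).length = W := by omega
      rw [hlW] at hub hlb
      have hc : c = C := hit_unique P M W c C hub hlb hC1 hC2
      rw [hout, hc]

lemma solution_eq_coll (n t m p : Int) (hm : 1 ≤ m) (hp : 1 ≤ p) (ht : 1 ≤ t) :
    ∃ C : Nat, (t*m).toNat ≤ (p-1).toNat + C*m.toNat ∧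
      (C = 0 ∨ (p-1).toNat + (C-1)*m.toNat < (t*m).toNat) ∧
      solution n t m p = String.ofList (coll n (p-1).toNat m.toNat C) := by
  obtain ⟨K, hK, hlen⟩ := wordLoop_spec n t m ((t*m).toNat + 1) 1 le_rfl (by push_cast; omega)
  have hstart : streamPre n 1 = (['0'] : List Char) := by
    simp [streamPre, chunkN, altDigits]
  have hone : ((1:Nat):Int) = (1:Int) := by norm_num
  rw [hstart, hone] at hK
  have hshow : solution n t m p
      = String.ofList ((PySem.List.pyRange (p-1) (t*m) m).foldl
        (fun acc i => acc ++ ((PySem.List.pyGet? (streamPre n K) i).elim []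
          (fun c => [c]))) []) := by
    show String.ofList ((PySem.List.pyRange (p-1) (t*m) m).foldl
        (fun acc i => acc ++ ((PySem.List.pyGet? (wordLoop n t m ((t*m).toNat + 1) 1 ['0']) i).elim []
          (fun c => [c]))) []) = _
    simp only [hK]
  by_cases hlt : p - 1 < t*m
  · -- at least one sample: the range has exactly C = ⌈(t*m-(p-1))/m⌉ indices
    set q : Int := (t*m - (p-1) + m - 1) / m with hq
    have hdm := Int.ediv_add_emod (t*m - (p-1) + m - 1) m
    rw [← hq] at hdm
    have hr0 := Int.emod_nonneg (t*m - (p-1) + m - 1) (by omega : m ≠ 0)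
    have hrlt := Int.emod_lt_of_pos (t*m - (p-1) + m - 1) (by omega : 0 < m)
    have hbl : t*m - (p-1) ≤ q*m := by
      have : m * q = q * m := by ring
      omega
    have hbr : (q-1)*m < t*m - (p-1) := by
      have h1 : (q-1)*m = q*m - m := by ring
      have h2 : m * q = q * m := by ring
      omega
    have hq0 : 0 < q := by
      rcases lt_trichotomy q 0 with h | h | h
      · exfalso
        have : q*m < 0 := mul_neg_of_neg_of_pos h (by omega)
        omega
      · exfalso
        rw [h] at hbl
        simp at hbl
        omega
      · exact h
    refine ⟨q.toNat, ?_, ?_, ?_⟩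
    · have hc : ((q.toNat * m.toNat : Nat):Int) = q*m := by
        push_cast
        rw [Int.toNat_of_nonneg (by omega), Int.toNat_of_nonneg (by omega : (0:Int) ≤ m)]
      omega
    · refine Or.inr ?_
      have hc : (((q.toNat - 1) * m.toNat : Nat):Int) = (q-1)*m := by
        push_cast [Int.toNat_of_nonneg (by omega : (0:Int) ≤ m)]
        have : ((q.toNat - 1 : Nat):Int) = q - 1 := by omega
        rw [this]
      omega
    · rw [hshow, PySem.List.pyRange_of_pos _ _ (by omega : (0:Int) < m), if_pos hlt, ← hq]
      have hpt : ∀ j ∈ List.range q.toNat,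
          (PySem.List.pyGet? (streamPre n K) ((p-1) + m*(j:Int))).elim [] (fun c => [c])
            = [sChar n ((p-1).toNat + j*m.toNat)] := by
        intro j hj
        have hjT : j < q.toNat := List.mem_range.mp hj
        have hidx0 : (0:Int) ≤ (p-1) + m*(j:Int) := by
          have := mul_nonneg (by omega : (0:Int) ≤ m) (Int.natCast_nonneg j)
          omega
        have c1 : (((p-1).toNat : Nat):Int) = p - 1 := by omega
        have c2 : ((m.toNat : Nat):Int) = m := by omega
        have hcast : (((p-1).toNat + j*m.toNat : Nat):Int) = (p-1) + m*(j:Int) := by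
          push_cast [c1, c2]; ring
        have hj1 : (j:Int) ≤ q - 1 := by
          have : ((j:Nat):Int) < ((q.toNat : Nat):Int) := by exact_mod_cast hjT
          omega
        have hlt2 : (p-1) + m*(j:Int) < t*m := by
          have hmono := mul_le_mul_of_nonneg_left hj1 (by omega : (0:Int) ≤ m)
          have h1 : m * (q-1) = (q-1)*m := by ring
          omega
        have hltN : (p-1).toNat + j*m.toNat < (streamPre n K).length := by
          have : (((p-1).toNat + j*m.toNat : Nat):Int) < ((streamPre n K).length : Int) := by
            rw [hcast]; omega
          exact_mod_cast this
        rw [PySem.List.pyGet?_of_nonneg _ hidx0,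
          show ((p-1) + m*(j:Int)).toNat = (p-1).toNat + j*m.toNat from by rw [← hcast]; omega,
          List.getElem?_eq_getElem hltN]
        simp only [Option.elim]
        rw [← List.getD_eq_getElem _ '?' hltN, getD_streamPre n hltN]
      simp only [List.foldl_map]
      rw [PySem.List.foldl_congr_mem _ _
          (fun acc (j:Nat) => acc ++ [sChar n ((p-1).toNat + j*m.toNat)]) _
          (fun acc j hj => by rw [hpt j hj]),
        PySem.List.foldl_append_singleton_eq_map, List.nil_append]
      rfl
  · -- window empty before the first sample position: the answer is empty
    refine ⟨0, by omega, Or.inl rfl, ?_⟩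
    rw [hshow, PySem.List.pyRange_of_pos _ _ (by omega : (0:Int) < m), if_neg hlt]
    simp [coll]

lemma solution_alt_eq_coll (n t m p : Int) (C : Nat) (hm : 1 ≤ m) (hp : 1 ≤ p)
    (ht : 1 ≤ t)
    (hC1 : (t*m).toNat ≤ (p-1).toNat + C*m.toNat)
    (hC2 : C = 0 ∨ (p-1).toNat + (C-1)*m.toNat < (t*m).toNat) :
    solution_alt n t m p = String.ofList (coll n (p-1).toNat m.toNat C) := by
  have htm : 0 < t*m := mul_pos (by omega) (by omega)
  have hP : (((p-1).toNat : Nat):Int) = p - 1 := by omega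
  have hM : ((m.toNat : Nat):Int) = m := by omega
  have hW : (((t*m).toNat : Nat):Int) = t*m := by omega
  have h := altLoop_spec n t m p (p-1).toNat m.toNat (t*m).toNat C hP hM hW (by omega)
    hC1 hC2 ((t*m).toNat + 2) 0 0 []
    (by simp [coll]) (by simp [streamPre]) (by simp [streamPre])
    (Or.inl rfl) (by omega)
  have hz : (((0:Nat)):Int) = (0:Int) := by norm_num
  have hz2 : (((streamPre n 0).length : Nat):Int) = (0:Int) := by simp [streamPre]
  rw [hz, hz2] at h
  unfold solution_alt
  rw [h]

lemma solution_empty (n t m p : Int) (hm : 1 ≤ m) (hp : 1 ≤ p) (ht : t ≤ 0) :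
    solution n t m p = "" := by
  unfold solution
  have htm : t*m ≤ 0 := by
    have h0 : 0 ≤ (-t)*m := mul_nonneg (by omega) (by omega)
    nlinarith
  have hrange : PySem.List.pyRange (p-1) (t*m) m = [] := by
    rw [PySem.List.pyRange_of_pos _ _ (by omega : (0:Int) < m), if_neg (by omega)]
    simp
  rw [hrange]
  rfl

lemma solution_alt_empty (n t m p : Int) (hm : 1 ≤ m) (ht : t ≤ 0) : solution_alt n t m p = "" := by
  unfold solution_alt
  have htm : t*m ≤ 0 := by
    have h0 : 0 ≤ (-t)*m := mul_nonneg (by omega) (by omega)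
    nlinarith
  rw [altLoop_done _ _ _ _ _ _ _ _ (by omega)]

-- ===== VERDICT (by name: the statement is the Claim_ definition above) =====
theorem solution_spec : Claim_equal_solution := by
  intro n t m p _ hpre
  obtain ⟨-, hm, hp⟩ := hpre
  unfold Spec_solution
  by_cases ht : t ≤ 0
  · rw [solution_empty n t m p hm hp ht, solution_alt_empty n t m p hm ht]
  · push_neg at ht
    obtain ⟨C, hC1, hC2, hA⟩ := solution_eq_coll n t m p hm hp (by omega)
    rw [hA, solution_alt_eq_coll n t m p C hm hp (by omega) hC1 hC2]
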